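-- pv_equiv track=rewrite | github.com/xelatihy/yocto-gl | tools/doxy2doc.py | add_toc
-- ===== SOURCE A (Python) =====
-- def add_toc(md):
--     count = 0
--     nmd = ''
--     toc = ''
--     for line in md.splitlines(True):
--         if line.startswith('# '):
--             title = 'About'
--             toc += f'- [{title}](#toc{count})\n'
--             nmd += f'<a id="toc{count}"></a>\n\n' + line
--             count += 1
--         elif line.startswith('## ') or line.startswith('### '):
--             title = line.replace('#','').strip()
--             indent = '    ' if line.startswith('### ') else ''
--             toc += f'{indent}- [{title}](#toc{count})\n'
--             nmd += f'<a id="toc{count}"></a>\n\n' + line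
--             count += 1
--         else:
--             nmd += line
--     return nmd, toc
-- ===== SOURCE B (Python) =====
-- def add_toc(md):
--     lines = md.splitlines(True)
--     heads = []
--     for line in lines:
--         if line.startswith('# '):
--             heads.append(('About', ''))
--         elif line.startswith('## '):
--             heads.append((line.replace('#', '').strip(), ''))
--         elif line.startswith('### '):
--             heads.append((line.replace('#', '').strip(), '    '))
--     toc = ''.join(f'{indent}- [{title}](#toc{i})\n'
--                   for i, (title, indent) in enumerate(heads))
--     parts = []
--     k = 0
--     for line in lines:
--         if line.startswith(('# ', '## ', '### ')):
--             parts.append(f'<a id="toc{k}"></a>\n\n')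
--             k += 1
--         parts.append(line)
--     return ''.join(parts), toc
-- ===== Notes on version B (the rewrite author's own statement) =====
-- stated objective: alternative
-- what changed: Single interleaved accumulate-everything loop replaced by three separate passes: extract a list of (title, indent) heading records, render the TOC from that list by enumeration, then rebuild the document with an anchor counter, joining collected parts instead of repeated string +=.
import Mathlib
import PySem

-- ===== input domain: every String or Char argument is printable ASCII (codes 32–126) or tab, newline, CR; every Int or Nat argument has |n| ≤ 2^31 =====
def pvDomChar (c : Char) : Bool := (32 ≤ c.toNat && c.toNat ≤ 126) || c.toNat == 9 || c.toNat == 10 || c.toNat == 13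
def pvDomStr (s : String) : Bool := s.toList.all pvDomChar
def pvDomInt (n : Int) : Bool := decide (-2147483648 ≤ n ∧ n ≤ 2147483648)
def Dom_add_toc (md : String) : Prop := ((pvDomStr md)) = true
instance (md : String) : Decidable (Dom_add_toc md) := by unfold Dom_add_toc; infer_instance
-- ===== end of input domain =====

-- B restructures A's single interleaved loop into three passes (heading records → toc → rebuilt
-- document); same return value, no speed claim.

-- md.splitlines(True) (keepends) ported by hand: exact for boundaries '\n', '\r\n', '\r',
-- which are the only line boundaries occurring on the Dom_add_toc character set.
def splitKeep : List Char → List Char → List (List Char)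
  | [], acc => if acc = [] then [] else [acc.reverse]
  | '\r' :: '\n' :: rest, acc => (acc.reverse ++ ['\r', '\n']) :: splitKeep rest []
  | '\r' :: rest, acc => (acc.reverse ++ ['\r']) :: splitKeep rest []
  | '\n' :: rest, acc => (acc.reverse ++ ['\n']) :: splitKeep rest []
  | c :: rest, acc => splitKeep rest (c :: acc)

-- ===== PORT A =====
def addTocStepA (st : Int × List Char × List Char) (line : List Char) : Int × List Char × List Char :=
  let count := st.1
  let nmd := st.2.1
  let toc := st.2.2
  if PySem.Chars.startswith line "# ".toList then
    let title := "About".toList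
    (count + 1,
     nmd ++ "<a id=\"toc".toList ++ PySem.Int.toChars count ++ "\"></a>\n\n".toList ++ line,
     toc ++ "- [".toList ++ title ++ "](#toc".toList ++ PySem.Int.toChars count ++ ")\n".toList)
  else if PySem.Chars.startswith line "## ".toList || PySem.Chars.startswith line "### ".toList then
    let title := PySem.Chars.strip (PySem.Chars.replace line "#".toList "".toList)
    let indent := if PySem.Chars.startswith line "### ".toList then "    ".toList else []
    (count + 1,
     nmd ++ "<a id=\"toc".toList ++ PySem.Int.toChars count ++ "\"></a>\n\n".toList ++ line,
     toc ++ indent ++ "- [".toList ++ title ++ "](#toc".toList ++ PySem.Int.toChars count ++ ")\n".toList)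
  else
    (count, nmd ++ line, toc)

def add_toc (md : String) : String × String :=
  let r := (splitKeep md.toList []).foldl addTocStepA (0, [], [])
  (String.ofList r.2.1, String.ofList r.2.2)

-- ===== PORT B =====
def altHeads : List (List Char) → List (List Char × List Char)
  | [] => []
  | line :: rest =>
    if PySem.Chars.startswith line "# ".toList then
      ("About".toList, []) :: altHeads rest
    else if PySem.Chars.startswith line "## ".toList then
      (PySem.Chars.strip (PySem.Chars.replace line "#".toList "".toList), []) :: altHeads rest
    else if PySem.Chars.startswith line "### ".toList then
      (PySem.Chars.strip (PySem.Chars.replace line "#".toList "".toList), "    ".toList) :: altHeads rest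
    else altHeads rest

def altToc : List (List Char × List Char) → Int → List Char
  | [], _ => []
  | (title, indent) :: rest, i =>
    indent ++ "- [".toList ++ title ++ "](#toc".toList ++ PySem.Int.toChars i ++ ")\n".toList
      ++ altToc rest (i + 1)

def altNmd : List (List Char) → Int → List Char
  | [], _ => []
  | line :: rest, k =>
    if PySem.Chars.startswith line "# ".toList || PySem.Chars.startswith line "## ".toList
        || PySem.Chars.startswith line "### ".toList then
      "<a id=\"toc".toList ++ PySem.Int.toChars k ++ "\"></a>\n\n".toList ++ line ++ altNmd rest (k + 1)
    else line ++ altNmd rest k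

def add_toc_alt (md : String) : String × String :=
  let lines := splitKeep md.toList []
  (String.ofList (altNmd lines 0), String.ofList (altToc (altHeads lines) 0))

-- ===== PRECONDITION & SPEC =====
def Spec_add_toc (md : String) (out : String × String) : Prop := out = add_toc_alt md
instance (md : String) (out : String × String) : Decidable (Spec_add_toc md out) := by unfold Spec_add_toc; infer_instance

-- ===== CLAIM (what is proved, stated in full; the proofs are below) =====
def Claim_equal_add_toc : Prop := ∀ (md : String), Dom_add_toc md → Spec_add_toc md (add_toc md)

-- ===== LEMMAS AND PROOFS =====

-- '## ' and '### ' prefixes are mutually exclusive (third char differs).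
lemma not_sw2_sw3 (l : List Char) :
    PySem.Chars.startswith l ['#', '#', ' '] = true →
    PySem.Chars.startswith l ['#', '#', '#', ' '] = false := by
  intro h
  rw [PySem.Chars.startswith_iff] at h
  by_contra hc
  rw [Bool.not_eq_false, PySem.Chars.startswith_iff] at hc
  obtain ⟨t2, h2⟩ := h
  obtain ⟨t3, h3⟩ := hc
  rw [← h3] at h2
  simp at h2

lemma loop_eq (lines : List (List Char)) :
    ∀ (c : Int) (nmd toc : List Char),
    lines.foldl addTocStepA (c, nmd, toc)
      = (c + (altHeads lines).length, nmd ++ altNmd lines c, toc ++ altToc (altHeads lines) c) := by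
  induction lines with
  | nil => intro c nmd toc; simp [altHeads, altNmd, altToc]
  | cons l rest ih =>
    intro c nmd toc
    by_cases h1 : PySem.Chars.startswith l ['#', ' '] = true
    · simp [addTocStepA, altHeads, altNmd, altToc, h1, ih, Prod.ext_iff]
      omega
    · by_cases h2 : PySem.Chars.startswith l ['#', '#', ' '] = true
      · have h3 := not_sw2_sw3 l h2
        simp [addTocStepA, altHeads, altNmd, altToc, h1, h2, h3, ih, Prod.ext_iff]
        omega
      · by_cases h3 : PySem.Chars.startswith l ['#', '#', '#', ' '] = true
        · simp [addTocStepA, altHeads, altNmd, altToc, h1, h2, h3, ih, Prod.ext_iff]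
          omega
        · simp [addTocStepA, altHeads, altNmd, h1, h2, h3, ih]

-- ===== VERDICT (by name: the statement is the Claim_ definition above) =====
theorem add_toc_spec : Claim_equal_add_toc := by
  intro md _
  unfold Spec_add_toc add_toc add_toc_alt
  simp [loop_eq]
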